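-- pv_equiv track=rewrite | github.com/nishantmudgal/code | puzzle.py | is_complete_puzzle
-- ===== SOURCE A (Python) =====
-- def is_complete_puzzle(puzzle_str, pieces):
--
--     # length of the puzzle string
--     puzzle_len = len(puzzle_str)
--
--     # Returns True if there is no '.' in the string i.e. string is complete
--     def is_complete(puzzle):
--         for i in range(puzzle_len):
--             if puzzle[i] == '.':
--                 return False
--         return True
--
--     # Return the string after adding 2 input string. Parameter 'reversed_add' defines if the second string is to be added in reverse or not
--     def add_two_string(str1, str2, reversed_add):
--         res = list(str1)
--         add_str = str2 if not reversed_add else str2[::-1]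
--         for i in range(puzzle_len):
--             if add_str[i] == '#' and res[i] == '.':
--                 res[i] = '#'
--         return "".join(res)
--
--     # Implementation of the logic of recursion
--     def solve_recursion(puzzle, index_current_piece):
--
--         # Return true if the puzzle is completed
--         if is_complete(puzzle):
--             return True
--
--         # Return False if all the pieces are tried
--         if index_current_piece == len(pieces):
--             return False
--
--         # Return True if we get complete string using the current piece in normally or reversed
--         return (solve_recursion(add_two_string(puzzle, pieces[index_current_piece-1], True), index_current_piece+1) or
--                 solve_recursion(add_two_string(puzzle, pieces[index_current_piece-1], False), index_current_piece+1))
--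
--     return solve_recursion(puzzle_str, 0)
-- ===== SOURCE B (Python) =====
-- def is_complete_puzzle(puzzle_str, pieces):
--     # Iterative breadth-first search over DEDUPLICATED sets of remaining-hole
--     # states, one level per piece (in natural order).  Correct because each
--     # branch of A's recursion applies every piece once in some orientation,
--     # hole-removal operations commute, and an already-complete puzzle stays
--     # complete; deduplicating equal states merges shared subproblems.
--     n = len(puzzle_str)
--     states = {frozenset(i for i in range(n) if puzzle_str[i] == '.')}
--     for p in pieces:
--         m = len(p)
--         fwd = frozenset(i for i in range(min(m, n)) if p[i] == '#')
--         rev = frozenset(i for i in range(min(m, n)) if p[m - 1 - i] == '#')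
--         states = {s - fwd for s in states} | {s - rev for s in states}
--     return frozenset() in states
-- ===== Notes on version B (the rewrite author's own statement) =====
-- stated objective: alternative
-- what changed: B replaces A's depth-first 2-way recursion over puzzle strings by an iterative level-by-level search that carries a deduplicated SET of reachable remaining-hole states (one level per piece, natural order), so equal subproblems are merged instead of re-explored.
-- outside the precondition, e.g. on is_complete_puzzle('..', ['#']): A raises IndexError, B returns False; on is_complete_puzzle('..', ['#', '##']): A returns True, B returns True
import Mathlib
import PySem

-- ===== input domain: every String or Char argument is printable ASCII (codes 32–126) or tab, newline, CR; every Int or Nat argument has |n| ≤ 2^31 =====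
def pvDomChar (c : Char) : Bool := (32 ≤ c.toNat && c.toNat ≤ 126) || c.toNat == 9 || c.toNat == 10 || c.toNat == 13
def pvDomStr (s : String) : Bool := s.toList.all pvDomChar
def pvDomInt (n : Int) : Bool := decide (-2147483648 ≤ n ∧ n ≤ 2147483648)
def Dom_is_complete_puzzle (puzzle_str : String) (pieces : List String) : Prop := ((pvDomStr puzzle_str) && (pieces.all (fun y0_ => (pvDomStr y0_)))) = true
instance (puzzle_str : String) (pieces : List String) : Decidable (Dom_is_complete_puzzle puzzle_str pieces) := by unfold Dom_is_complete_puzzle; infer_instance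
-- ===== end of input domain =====

-- B replaces A's depth-first 2-way recursion over puzzle strings by an iterative level-by-level
-- search carrying a deduplicated set of reachable remaining-hole states (one level per piece,
-- natural order): equal subproblems are merged instead of re-explored (alternative algorithm).


-- ===== PORT A =====
-- is_complete: loop over range(puzzle_len); in-range indexing, so getD is exact here
def pvA_complete (n : Nat) (s : List Char) : Bool :=
  (List.range n).all (fun i => !(s.getD i ' ' == '.'))

-- add_two_string: res = list(str1); loop assigning res[i].  Python raises IndexError when the
-- (oriented) piece is shorter than puzzle_len; there getD yields ' ' ≠ '#' — excluded by Pre_.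
def pvA_add (n : Nat) (s : List Char) (piece : List Char) (rev : Bool) : List Char :=
  let a := if rev then piece.reverse else piece
  (List.range n).foldl (fun res i =>
    if a.getD i ' ' == '#' && res.getD i ' ' == '.' then res.set i '#' else res) s

-- solve_recursion; rem = len(pieces) - index_current_piece (fuel for the structural recursion)
def pvA_solve (pieces : List (List Char)) (n : Nat) : Nat → List Char → Bool
  | 0, s => if pvA_complete n s then true else false
  | r + 1, s =>
    if pvA_complete n s then true
    else
      let idx : Int := (pieces.length : Int) - ((r : Int) + 1)
      -- pieces[index_current_piece - 1]: negative index wraps (pieces[-1] at index 0)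
      let p := (PySem.List.pyGet? pieces (idx - 1)).getD []
      pvA_solve pieces n r (pvA_add n s p true) || pvA_solve pieces n r (pvA_add n s p false)

def is_complete_puzzle (puzzle_str : String) (pieces : List String) : Bool :=
  let s := puzzle_str.toList
  pvA_solve (pieces.map String.toList) s.length pieces.length s

-- ===== PORT B =====
-- one loop iteration: fwd/rev cover sets of the piece, then the new deduplicated state set
-- {s - fwd for s in states} | {s - rev for s in states}
def pvB_step (n : Nat) (states : List (List Nat)) (p : List Char) : List (List Nat) :=
  let m := p.length
  let fwd := (List.range (min m n)).filter (fun i => p.getD i ' ' == '#')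
  let rv := (List.range (min m n)).filter (fun i => p.getD (m - 1 - i) ' ' == '#')
  PySem.Set.union
    (PySem.Set.ofList (states.map (fun t => t.filter (fun i => !(fwd.contains i)))))
    (states.map (fun t => t.filter (fun i => !(rv.contains i))))

def is_complete_puzzle_alt (puzzle_str : String) (pieces : List String) : Bool :=
  let s := puzzle_str.toList
  let n := s.length
  let init : List (List Nat) :=
    PySem.Set.ofList [(List.range n).filter (fun i => s.getD i ' ' == '.')]
  ((pieces.map String.toList).foldl (pvB_step n) init).contains ([] : List Nat)

-- ===== PRECONDITION & SPEC =====
-- Pre_ excludes inputs where some piece is shorter than a puzzle that still has holes: on those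
-- A raises IndexError in add_two_string, except for a few where A returns True early before
-- touching the short piece (and B returns True there too).
def Pre_is_complete_puzzle (puzzle_str : String) (pieces : List String) : Prop :=
  (∀ p ∈ pieces, puzzle_str.toList.length ≤ p.toList.length) ∨ ('.' ∉ puzzle_str.toList)

instance (puzzle_str : String) (pieces : List String) : Decidable (Pre_is_complete_puzzle puzzle_str pieces) := by
  unfold Pre_is_complete_puzzle; infer_instance

def pvWitness_is_complete_puzzle : String × List String := ("..", ["#.", ".#"])

def Spec_is_complete_puzzle (puzzle_str : String) (pieces : List String) (out : Bool) : Prop := out = is_complete_puzzle_alt puzzle_str pieces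
instance (puzzle_str : String) (pieces : List String) (out : Bool) : Decidable (Spec_is_complete_puzzle puzzle_str pieces out) := by unfold Spec_is_complete_puzzle; infer_instance

-- ===== CLAIM (what is proved, stated in full; the proofs are below) =====
def Claim_equal_is_complete_puzzle : Prop := ∀ (puzzle_str : String) (pieces : List String), Dom_is_complete_puzzle puzzle_str pieces → Pre_is_complete_puzzle puzzle_str pieces → Spec_is_complete_puzzle puzzle_str pieces (is_complete_puzzle puzzle_str pieces)

-- ===== LEMMAS AND PROOFS =====

-- proof-side DFS over uncovered hole indices: the common meeting point of the two ports
def pvB_predR (p : List Char) : Nat → Bool :=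
  fun i => !(decide (i < p.length) && (p.getD (p.length - 1 - i) ' ' == '#'))
def pvB_predF (p : List Char) : Nat → Bool :=
  fun i => !(decide (i < p.length) && (p.getD i ' ' == '#'))

def pvB_go : List (List Char) → List Nat → Bool
  | _, [] => true
  | [], _ :: _ => false
  | p :: rest, h :: hs =>
    pvB_go rest ((h :: hs).filter (pvB_predR p)) || pvB_go rest ((h :: hs).filter (pvB_predF p))

-- the set of still-open hole indices of a puzzle state
def pvHoles (n : Nat) (s : List Char) : List Nat :=
  (List.range n).filter (fun i => s.getD i ' ' == '.')

lemma pvB_go_nil_holes (ps : List (List Char)) : pvB_go ps [] = true := by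
  cases ps <;> rfl

-- one unfolding step of pvB_go, uniform in whether holes is empty
lemma pvB_go_cons (p : List Char) (rest : List (List Char)) (H : List Nat) :
    pvB_go (p :: rest) H =
      (pvB_go rest (H.filter (pvB_predR p)) || pvB_go rest (H.filter (pvB_predF p))) := by
  cases H with
  | nil => simp [pvB_go, pvB_go_nil_holes]
  | cons h hs => rfl

lemma pvB_go_swap (c d : List Char) (cs : List (List Char)) (H : List Nat) :
    pvB_go (c :: d :: cs) H = pvB_go (d :: c :: cs) H := by
  simp only [pvB_go_cons, List.filter_filter]
  have hcomm : ∀ (p q : Nat → Bool),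
      H.filter (fun i => p i && q i) = H.filter (fun i => q i && p i) := by
    intro p q
    apply List.filter_congr
    intro i _
    exact Bool.and_comm _ _
  rw [hcomm (pvB_predR c) (pvB_predR d), hcomm (pvB_predR c) (pvB_predF d),
      hcomm (pvB_predF c) (pvB_predR d), hcomm (pvB_predF c) (pvB_predF d)]
  cases pvB_go cs (H.filter fun i => pvB_predR d i && pvB_predR c i) <;>
  cases pvB_go cs (H.filter fun i => pvB_predR d i && pvB_predF c i) <;>
  cases pvB_go cs (H.filter fun i => pvB_predF d i && pvB_predR c i) <;>
  cases pvB_go cs (H.filter fun i => pvB_predF d i && pvB_predF c i) <;> simp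

-- moving the last piece to the front does not change the result
lemma pvB_go_rotate (cs : List (List Char)) (c : List Char) (H : List Nat) :
    pvB_go (cs ++ [c]) H = pvB_go (c :: cs) H := by
  induction cs generalizing H with
  | nil => rfl
  | cons d cs ih =>
    rw [List.cons_append, pvB_go_cons, ih, ih, ← pvB_go_cons d (c :: cs) H, pvB_go_swap]

lemma pvA_complete_eq (n : Nat) (s : List Char) :
    pvA_complete n s = (pvHoles n s).isEmpty := by
  apply Bool.coe_iff_coe.mp
  simp [pvA_complete, pvHoles, List.isEmpty_iff, List.filter_eq_nil_iff]

-- characterization of the add_two_string fold, entry by entry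
lemma pvA_add_fold_getD (a : List Char) (l : List Nat) (hl : l.Nodup) (s : List Char) (j : Nat) :
    (l.foldl (fun res i =>
      if a.getD i ' ' == '#' && res.getD i ' ' == '.' then res.set i '#' else res) s).getD j ' ' =
    if j ∈ l ∧ a.getD j ' ' = '#' ∧ s.getD j ' ' = '.' then '#' else s.getD j ' ' := by
  induction l generalizing s with
  | nil => simp
  | cons i l ih =>
    rw [List.nodup_cons] at hl
    obtain ⟨hi, hl⟩ := hl
    simp only [List.foldl_cons]
    set s' := if a.getD i ' ' == '#' && s.getD i ' ' == '.' then s.set i '#' else s with hs'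
    have hgetD : ∀ k, s'.getD k ' ' =
        if k = i ∧ a.getD k ' ' = '#' ∧ s.getD k ' ' = '.' then '#' else s.getD k ' ' := by
      intro k
      by_cases hc : a.getD i ' ' = '#' ∧ s.getD i ' ' = '.'
      · rw [hs', if_pos (by simp only [Bool.and_eq_true, beq_iff_eq]; exact ⟨hc.1, hc.2⟩)]
        by_cases hk : k = i
        · subst hk
          have hklt : k < s.length := by
            by_contra hge
            have h0 : s.getD k ' ' = ' ' := List.getD_eq_default _ _ (by omega)
            rw [h0] at hc
            exact absurd hc.2 (by decide)
          rw [if_pos (show k = k ∧ a.getD k ' ' = '#' ∧ s.getD k ' ' = '.' from ⟨rfl, hc⟩)]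
          simp [List.getD, hklt]
        · have hik : i ≠ k := fun h => hk h.symm
          simp [List.getD, hik, hk]
      · rw [hs', if_neg (by simp only [Bool.and_eq_true, beq_iff_eq]; exact hc)]
        by_cases hk : k = i
        · subst hk
          rw [if_neg (fun h => hc ⟨h.2.1, h.2.2⟩)]
        · rw [if_neg (fun h => hk h.1)]
    rw [ih hl s']
    by_cases hj : j ∈ l
    · have hji : j ≠ i := fun h => hi (h ▸ hj)
      have hsj : s'.getD j ' ' = s.getD j ' ' := by
        rw [hgetD j, if_neg (fun h => hji h.1)]
      rw [hsj]
      simp [List.mem_cons, hj]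
    · rw [if_neg (fun h => hj h.1), hgetD j]
      by_cases hji : j = i
      · subst hji
        simp [List.mem_cons, hj]
      · simp [List.mem_cons, hj, hji]

lemma pvA_add_getD (n : Nat) (s : List Char) (p : List Char) (rev : Bool) (j : Nat) :
    (pvA_add n s p rev).getD j ' ' =
      if j < n ∧ (if rev then p.reverse else p).getD j ' ' = '#' ∧ s.getD j ' ' = '.'
      then '#' else s.getD j ' ' := by
  unfold pvA_add
  rw [pvA_add_fold_getD _ _ (List.nodup_range) s j]
  simp [List.mem_range]

lemma pvHoles_add (n : Nat) (s : List Char) (p : List Char) (rev : Bool) :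
    pvHoles n (pvA_add n s p rev) =
      (pvHoles n s).filter (fun i => !((if rev then p.reverse else p).getD i ' ' == '#')) := by
  unfold pvHoles
  rw [List.filter_filter]
  apply List.filter_congr
  intro i hi
  rw [List.mem_range] at hi
  rw [pvA_add_getD]
  generalize (if rev = true then p.reverse else p).getD i ' ' = x
  generalize s.getD i ' ' = y
  by_cases hx : x = '#' <;> by_cases hy : y = '.' <;> simp [hi, hx, hy]

-- an element accessed as pieces[k-1] (with Python's negative wrap at k = 0) is a member of pieces
lemma pvAcc_mem (pieces : List (List Char)) (hne : pieces ≠ []) (k : Nat) (hk : k < pieces.length) :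
    (PySem.List.pyGet? pieces ((k : Int) - 1)).getD [] ∈ pieces := by
  cases k with
  | zero =>
    rw [show (((0 : Nat) : Int) - 1) = (-1 : Int) by norm_num, PySem.List.pyGet?_neg_one,
      List.getLast?_eq_some_getLast hne]
    exact List.getLast_mem hne
  | succ k =>
    have hcast : ((k + 1 : Nat) : Int) - 1 = (k : Nat) := by push_cast; ring
    rw [hcast, PySem.List.pyGet?_natCast]
    have hk' : k < pieces.length := by omega
    simp [List.getElem?_eq_getElem hk']

-- main bridge from A's string recursion to the hole-set DFS (pieces applied in A's order)
lemma pvBridge (pieces : List (List Char)) (n : Nat)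
    (hlen : ∀ q ∈ pieces, n ≤ q.length) :
    ∀ rem s, rem ≤ pieces.length →
      pvA_solve pieces n rem s =
        pvB_go ((List.range' (pieces.length - rem) rem).map
          (fun k : Nat => (PySem.List.pyGet? pieces ((k : Int) - 1)).getD [])) (pvHoles n s) := by
  intro rem
  induction rem with
  | zero =>
    intro s _
    rw [pvA_solve, pvA_complete_eq]
    simp only [List.range'_zero, List.map_nil]
    cases h : pvHoles n s <;> simp [pvB_go]
  | succ r ih =>
    intro s hrem
    have hne : pieces ≠ [] := by
      intro h; rw [h] at hrem; simp at hrem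
    have hrange : List.range' (pieces.length - (r + 1)) (r + 1) =
        (pieces.length - (r + 1)) :: List.range' (pieces.length - r) r := by
      rw [List.range'_succ,
        show pieces.length - (r + 1) + 1 = pieces.length - r from by omega]
    have hidx : ((pieces.length : Int) - ((r : Int) + 1)) - 1 =
        ((pieces.length - (r + 1) : Nat) : Int) - 1 := by omega
    have hklt : pieces.length - (r + 1) < pieces.length := by omega
    rw [pvA_solve, pvA_complete_eq]
    set k := pieces.length - (r + 1) with hk
    set p := (PySem.List.pyGet? pieces ((k : Int) - 1)).getD [] with hp
    have hpmem : p ∈ pieces := pvAcc_mem pieces hne k hklt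
    have hplen : n ≤ p.length := hlen p hpmem
    rw [hrange]
    simp only [List.map_cons]
    rw [pvB_go_cons]
    by_cases hcomp : (pvHoles n s).isEmpty
    · rw [if_pos hcomp]
      rw [List.isEmpty_iff] at hcomp
      rw [hcomp]
      simp [pvB_go_nil_holes]
    · rw [if_neg hcomp]
      have hsub : ∀ i ∈ pvHoles n s, i < n := by
        intro i hi
        rw [pvHoles, List.mem_filter, List.mem_range] at hi
        exact hi.1
      have hfilterR : (pvHoles n s).filter (pvB_predR p) =
          (pvHoles n s).filter (fun i => !(p.reverse.getD i ' ' == '#')) := by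
        apply List.filter_congr
        intro i hi
        have hin : i < p.length := lt_of_lt_of_le (hsub i hi) hplen
        simp only [pvB_predR, hin, decide_true, Bool.true_and]
        congr 1
        rw [List.getD_eq_getElem _ ' ' (show p.length - 1 - i < p.length by omega),
            List.getD_eq_getElem _ ' ' (show i < p.reverse.length by simpa using hin),
            List.getElem_reverse]
      have hfilterF : (pvHoles n s).filter (pvB_predF p) =
          (pvHoles n s).filter (fun i => !(p.getD i ' ' == '#')) := by
        apply List.filter_congr
        intro i hi
        have hin : i < p.length := lt_of_lt_of_le (hsub i hi) hplen
        simp only [pvB_predF, hin, decide_true, Bool.true_and]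
      have h1 := ih (pvA_add n s p true) (by omega)
      have h2 := ih (pvA_add n s p false) (by omega)
      rw [hidx, ← hp, h1, h2, pvHoles_add, pvHoles_add, hfilterR, hfilterF]
      rfl

-- the rotated access order: [pieces[-1], pieces[0], …, pieces[len-2]]
lemma pvAccList (pieces : List (List Char)) (hne : pieces ≠ []) :
    (List.range' 0 pieces.length).map
        (fun k : Nat => (PySem.List.pyGet? pieces ((k : Int) - 1)).getD []) =
      pieces.getLast hne :: pieces.dropLast := by
  cases hm : pieces.length with
  | zero => exact absurd (List.length_eq_zero_iff.mp hm) hne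
  | succ m =>
    rw [List.range'_succ, List.map_cons]
    congr 1
    · rw [show (((0 : Nat) : Int) - 1) = (-1 : Int) by norm_num, PySem.List.pyGet?_neg_one,
        List.getLast?_eq_some_getLast hne]
      rfl
    · have hlen : pieces.dropLast.length = m := by
        simp [List.length_dropLast, hm]
      apply List.ext_getElem?
      intro j
      by_cases hj : j < m
      · rw [List.getElem?_map]
        have h1 : (List.range' 1 m)[j]? = some (1 + j) := by
          rw [List.getElem?_eq_getElem (by simpa using hj)]
          simp [List.getElem_range']
        rw [h1]
        have hcast : ((1 + j : Nat) : Int) - 1 = ((j : Nat) : Int) := by push_cast; ring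
        simp only [Option.map_some]
        rw [hcast, PySem.List.pyGet?_natCast]
        have hjp : j < pieces.length := by omega
        rw [List.getElem?_eq_getElem hjp, List.getElem?_eq_getElem (by omega : j < pieces.dropLast.length)]
        simp [List.getElem_dropLast]
      · rw [List.getElem?_eq_none (by simpa using (by omega : m ≤ j)),
            List.getElem?_eq_none (by omega : pieces.dropLast.length ≤ j)]

lemma pvHoles_nil_of_no_dot (s : List Char) (h : '.' ∉ s) (n : Nat) (hn : n = s.length) :
    pvHoles n s = [] := by
  rw [pvHoles, List.filter_eq_nil_iff]
  intro i hi
  rw [List.mem_range, hn] at hi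
  rw [List.getD_eq_getElem s ' ' hi]
  simp only [beq_iff_eq]
  intro hdot
  exact h (hdot ▸ List.getElem_mem hi)

-- ===== new lemmas: B's deduplicated BFS equals the hole-set DFS =====

-- any over a list depends only on membership
lemma pv_any_mem_congr {α : Type} (l l' : List α) (h : ∀ x, x ∈ l ↔ x ∈ l') (f : α → Bool) :
    l.any f = l'.any f := by
  apply Bool.coe_iff_coe.mp
  simp only [List.any_eq_true]
  constructor
  · rintro ⟨x, hx, hf⟩; exact ⟨x, (h x).mp hx, hf⟩
  · rintro ⟨x, hx, hf⟩; exact ⟨x, (h x).mpr hx, hf⟩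

lemma pv_any_congr {α : Type} (l : List α) (f g : α → Bool) (h : ∀ x ∈ l, f x = g x) :
    l.any f = l.any g := by
  induction l with
  | nil => rfl
  | cons x l ih =>
    simp only [List.any_cons, h x (List.mem_cons_self), ih (fun y hy => h y (List.mem_cons_of_mem x hy))]

-- one BFS level seen through `any`
lemma pv_step_any (n : Nat) (S : List (List Nat)) (p : List Char)
    (hS : ∀ H ∈ S, ∀ i ∈ H, i < n) (f : List Nat → Bool) :
    (pvB_step n S p).any f =
      (S.any fun H => f (H.filter (pvB_predR p)) || f (H.filter (pvB_predF p))) := by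
  unfold pvB_step
  have hmem : ∀ x, x ∈ PySem.Set.union
      (PySem.Set.ofList (S.map (fun t => t.filter (fun i =>
        !(((List.range (min p.length n)).filter (fun i => p.getD i ' ' == '#')).contains i)))))
      (S.map (fun t => t.filter (fun i =>
        !(((List.range (min p.length n)).filter (fun i => p.getD (p.length - 1 - i) ' ' == '#')).contains i)))) ↔
      x ∈ (S.map (fun t => t.filter (fun i =>
        !(((List.range (min p.length n)).filter (fun i => p.getD i ' ' == '#')).contains i)))) ++
        (S.map (fun t => t.filter (fun i =>
        !(((List.range (min p.length n)).filter (fun i => p.getD (p.length - 1 - i) ' ' == '#')).contains i)))) := by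
    intro x
    rw [List.mem_append, PySem.Set.mem_union, PySem.Set.mem_ofList]
  rw [pv_any_mem_congr _ _ hmem f, List.any_append, List.any_map, List.any_map]
  have hF : ∀ H ∈ S, (H.filter (fun i =>
      !(((List.range (min p.length n)).filter (fun i => p.getD i ' ' == '#')).contains i))) =
      H.filter (pvB_predF p) := by
    intro H hH
    apply List.filter_congr
    intro i hi
    have hin : i < n := hS H hH i hi
    simp only [pvB_predF, List.contains_eq_mem, List.mem_filter, List.mem_range, lt_min_iff]
    by_cases hm : i < p.length <;> simp [hm, hin, Bool.beq_eq_decide_eq]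
  have hR : ∀ H ∈ S, (H.filter (fun i =>
      !(((List.range (min p.length n)).filter (fun i => p.getD (p.length - 1 - i) ' ' == '#')).contains i))) =
      H.filter (pvB_predR p) := by
    intro H hH
    apply List.filter_congr
    intro i hi
    have hin : i < n := hS H hH i hi
    simp only [pvB_predR, List.contains_eq_mem, List.mem_filter, List.mem_range, lt_min_iff]
    by_cases hm : i < p.length <;> simp [hm, hin, Bool.beq_eq_decide_eq]
  apply Bool.coe_iff_coe.mp
  simp only [Bool.or_eq_true, List.any_eq_true, Function.comp_apply]
  constructor
  · rintro (⟨H, hH, hf⟩ | ⟨H, hH, hf⟩)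
    · exact ⟨H, hH, Or.inr (by rw [← hF H hH]; exact hf)⟩
    · exact ⟨H, hH, Or.inl (by rw [← hR H hH]; exact hf)⟩
  · rintro ⟨H, hH, hf | hf⟩
    · exact Or.inr ⟨H, hH, by rw [hR H hH]; exact hf⟩
    · exact Or.inl ⟨H, hH, by rw [hF H hH]; exact hf⟩

lemma pv_step_bound (n : Nat) (S : List (List Nat)) (p : List Char)
    (hS : ∀ H ∈ S, ∀ i ∈ H, i < n) :
    ∀ H ∈ pvB_step n S p, ∀ i ∈ H, i < n := by
  intro H hH i hi
  unfold pvB_step at hH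
  rw [PySem.Set.mem_union, PySem.Set.mem_ofList] at hH
  rcases hH with hH | hH <;>
  · rw [List.mem_map] at hH
    obtain ⟨t, ht, rfl⟩ := hH
    exact hS t ht i (List.mem_of_mem_filter hi)

-- the BFS over deduplicated state sets computes the DFS result
lemma pvBFS (n : Nat) (ps : List (List Char)) :
    ∀ (S : List (List Nat)), (∀ H ∈ S, ∀ i ∈ H, i < n) →
      (ps.foldl (pvB_step n) S).contains ([] : List Nat) = S.any (fun H => pvB_go ps H) := by
  induction ps with
  | nil =>
    intro S _
    apply Bool.coe_iff_coe.mp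
    simp only [List.foldl_nil, List.contains_eq_mem, decide_eq_true_eq, List.any_eq_true]
    constructor
    · intro h; exact ⟨[], h, by rw [pvB_go_nil_holes]⟩
    · rintro ⟨H, hH, hgo⟩
      cases H with
      | nil => exact hH
      | cons h hs => cases hgo
  | cons p ps ih =>
    intro S hS
    rw [List.foldl_cons, ih (pvB_step n S p) (pv_step_bound n S p hS),
        pv_step_any n S p hS (pvB_go ps)]
    exact pv_any_congr _ _ _ (fun H _ => (pvB_go_cons p ps H).symm)

-- B's port reduces to the DFS on the initial hole set
lemma pvAlt_eq_go (puzzle_str : String) (pieces : List String) :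
    is_complete_puzzle_alt puzzle_str pieces =
      pvB_go (pieces.map String.toList)
        (pvHoles puzzle_str.toList.length puzzle_str.toList) := by
  show ((pieces.map String.toList).foldl (pvB_step puzzle_str.toList.length)
      (PySem.Set.ofList [pvHoles puzzle_str.toList.length puzzle_str.toList])).contains [] = _
  have hinit : PySem.Set.ofList [pvHoles puzzle_str.toList.length puzzle_str.toList] =
      [pvHoles puzzle_str.toList.length puzzle_str.toList] := rfl
  rw [hinit, pvBFS]
  · simp
  · intro H hH i hi
    rw [List.mem_singleton] at hH
    subst hH
    rw [pvHoles, List.mem_filter, List.mem_range] at hi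
    exact hi.1

-- ===== VERDICT =====
theorem is_complete_puzzle_spec : Claim_equal_is_complete_puzzle := by
  intro puzzle_str pieces _ hpre
  show is_complete_puzzle puzzle_str pieces = is_complete_puzzle_alt puzzle_str pieces
  rw [pvAlt_eq_go]
  simp only [is_complete_puzzle]
  rcases hpre with hlen | hnodot
  · have hlen' : ∀ q ∈ pieces.map String.toList, puzzle_str.toList.length ≤ q.length := by
      intro q hq
      rw [List.mem_map] at hq
      obtain ⟨p, hp, rfl⟩ := hq
      exact hlen p hp
    have hb := pvBridge (pieces.map String.toList) puzzle_str.toList.length hlen'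
      pieces.length puzzle_str.toList (by simp)
    rw [show (pieces.map String.toList).length - pieces.length = 0 from by simp] at hb
    rw [hb]
    by_cases hne : pieces = []
    · subst hne
      rfl
    · have hne' : pieces.map String.toList ≠ [] := by simpa using hne
      rw [show pieces.length = (pieces.map String.toList).length from by simp,
        pvAccList (pieces.map String.toList) hne', ← pvB_go_rotate,
        List.dropLast_append_getLast hne']
  · have hholes : pvHoles puzzle_str.toList.length puzzle_str.toList = [] :=
      pvHoles_nil_of_no_dot _ hnodot _ rfl
    have hholes2 : pvHoles puzzle_str.length puzzle_str.toList = [] :=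
      pvHoles_nil_of_no_dot _ hnodot _ (by simp)
    rw [hholes, pvB_go_nil_holes]
    cases hm : pieces.length with
    | zero => simp [pvA_solve, pvA_complete_eq, hholes2]
    | succ r => simp [pvA_solve, pvA_complete_eq, hholes2]
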